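-- pv_equiv track=rewrite | github.com/YuzhouTu/Recipe-Recommender | renew.py | get_step_cnts
-- ===== SOURCE A (Python) =====
-- def get_step_cnts(l):
-- 	step_c = {}
-- 	if l["steps"]:
-- 		for ll in l["steps"]:
-- 			ty=ll["type"]
-- 			if ty not in step_c.keys():
-- 				step_c[ty] = 0
-- 			step_c[ty] += 1
--
-- 	if "PREPARATION" not in step_c.keys():
-- 		step_c["PREPARATION"] = 0
-- 	if "PROCESSING" not in step_c.keys():
-- 		step_c["PROCESSING"] = 0
-- 	step_c["TOTAL"]=sum(step_c.values())
--
-- 	return step_c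
-- ===== SOURCE B (Python) =====
-- def get_step_cnts(l):
-- 	types = [s["type"] for s in l["steps"]]
-- 	step_c = {}
-- 	for ty in types:
-- 		if ty not in step_c:
-- 			step_c[ty] = types.count(ty)
-- 	step_c.setdefault("PREPARATION", 0)
-- 	step_c.setdefault("PROCESSING", 0)
-- 	step_c["TOTAL"] = len(types)
-- 	return step_c
-- ===== Notes on version B (the rewrite author's own statement) =====
-- stated objective: alternative
-- what changed: B first extracts the list of step types, then fills each distinct type's count by a whole-list rescan (list.count) and sets TOTAL to len(types), instead of A's single accumulating '+= 1' pass followed by sum(step_c.values()).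
import Mathlib
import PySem

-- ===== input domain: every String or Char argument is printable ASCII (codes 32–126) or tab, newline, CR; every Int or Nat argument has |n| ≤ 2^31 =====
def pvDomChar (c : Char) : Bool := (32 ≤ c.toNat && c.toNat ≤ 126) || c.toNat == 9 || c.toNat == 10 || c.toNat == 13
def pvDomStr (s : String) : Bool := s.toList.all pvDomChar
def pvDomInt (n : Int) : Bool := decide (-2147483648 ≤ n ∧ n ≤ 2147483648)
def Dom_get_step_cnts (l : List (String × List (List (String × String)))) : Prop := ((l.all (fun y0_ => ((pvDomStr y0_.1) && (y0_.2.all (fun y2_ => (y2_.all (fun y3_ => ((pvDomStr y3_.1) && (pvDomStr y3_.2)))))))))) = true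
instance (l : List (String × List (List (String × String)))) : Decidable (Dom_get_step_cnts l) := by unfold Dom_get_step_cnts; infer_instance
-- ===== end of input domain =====

-- B counts each distinct step type by a whole-list rescan (list.count) and sets TOTAL to len(types),
-- instead of A's accumulating '+= 1' pass followed by sum(step_c.values()); same cost class, alternative shape.

-- ===== PORT A =====
-- loop body of A: if ty not in step_c: step_c[ty] = 0; step_c[ty] += 1
def stepA (sc : PySem.Dict String Int) (ty : String) : PySem.Dict String Int :=
  let sc := if sc.contains ty then sc else sc.insert ty 0
  sc.insert ty (sc.getD ty 0 + 1)

def loopA (steps : List (List (String × String))) : PySem.Dict String Int :=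
  steps.foldl (fun sc ll =>
    match PySem.Dict.get? (PySem.Dict.mk ll) "type" with
    | none => sc  -- Python raises KeyError here; excluded by Pre_
    | some ty => stepA sc ty) PySem.Dict.empty

-- tail of A: the PREPARATION/PROCESSING defaults and TOTAL = sum(step_c.values())
def finishA (d : PySem.Dict String Int) : List (String × Int) :=
  let d := if d.contains "PREPARATION" then d else d.insert "PREPARATION" 0
  let d := if d.contains "PROCESSING" then d else d.insert "PROCESSING" 0
  (d.insert "TOTAL" d.values.sum).items

def get_step_cnts (l : List (String × List (List (String × String)))) : List (String × Int) :=
  match PySem.Dict.get? (PySem.Dict.mk l) "steps" with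
  | none => []  -- Python raises KeyError here; excluded by Pre_
  | some steps => finishA (if steps ≠ [] then loopA steps else PySem.Dict.empty)

-- ===== PORT B =====
-- loop of B: for ty in types: if ty not in step_c: step_c[ty] = types.count(ty)
def loopB (types : List String) : PySem.Dict String Int :=
  types.foldl (fun sc ty =>
    if sc.contains ty then sc else sc.insert ty (types.count ty : Int)) PySem.Dict.empty

-- tail of B: the two setdefaults and TOTAL = len(types)
def finishB (d : PySem.Dict String Int) (total : Int) : List (String × Int) :=
  let d := d.setdefault "PREPARATION" 0
  let d := d.setdefault "PROCESSING" 0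
  (d.insert "TOTAL" total).items

def get_step_cnts_alt (l : List (String × List (List (String × String)))) : List (String × Int) :=
  match PySem.Dict.get? (PySem.Dict.mk l) "steps" with
  | none => []  -- Python raises KeyError here; excluded by Pre_
  | some steps =>
    -- types = [s["type"] for s in l["steps"]]; the .getD "" arm is the KeyError case, excluded by Pre_
    let types : List String := steps.map (fun s => (PySem.Dict.get? (PySem.Dict.mk s) "type").getD "")
    finishB (loopB types) (types.length : Int)

-- ===== PRECONDITION & SPEC =====
-- Pre_ excludes exactly the inputs where Python A raises KeyError: no "steps" key, or a step without a "type" key.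
def Pre_get_step_cnts (l : List (String × List (List (String × String)))) : Prop :=
  (PySem.Dict.get? (PySem.Dict.mk l) "steps").isSome = true ∧
  ∀ s ∈ (PySem.Dict.get? (PySem.Dict.mk l) "steps").getD [],
    (PySem.Dict.get? (PySem.Dict.mk s) "type").isSome = true
instance (l : List (String × List (List (String × String)))) : Decidable (Pre_get_step_cnts l) := by unfold Pre_get_step_cnts; infer_instance
def pvWitness_get_step_cnts : (List (String × List (List (String × String)))) :=
  [("steps", [[("type", "PREPARATION")], [("type", "MIXING")]])]
def Spec_get_step_cnts (l : List (String × List (List (String × String)))) (out : List (String × Int)) : Prop := out = get_step_cnts_alt l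
instance (l : List (String × List (List (String × String)))) (out : List (String × Int)) : Decidable (Spec_get_step_cnts l out) := by unfold Spec_get_step_cnts; infer_instance

-- ===== CLAIM (what is proved, stated in full; the proofs are below) =====
def Claim_equal_get_step_cnts : Prop := ∀ (l : List (String × List (List (String × String)))), Dom_get_step_cnts l → Pre_get_step_cnts l → Spec_get_step_cnts l (get_step_cnts l)

-- ===== LEMMAS AND PROOFS =====

-- A's loop body is the standard counter step.
lemma stepA_eq_counter_step (sc : PySem.Dict String Int) (ty : String) :
    stepA sc ty = sc.insert ty (sc.getD ty 0 + 1) := by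
  unfold stepA
  by_cases h : sc.contains ty = true
  · simp [h]
  · rw [Bool.not_eq_true] at h
    simp [h, PySem.Dict.getD_insert_self, PySem.Dict.insert_insert_self,
      PySem.Dict.getD_of_not_contains, pysem]

-- Under Pre_, A's loop over the step dicts is the counter fold over the extracted types.
lemma loopA_eq_counter (steps : List (List (String × String)))
    (h : ∀ s ∈ steps, (PySem.Dict.get? (PySem.Dict.mk s) "type").isSome = true) :
    loopA steps = PySem.Dict.counter
      (steps.map (fun s => (PySem.Dict.get? (PySem.Dict.mk s) "type").getD "")) := by
  rw [← PySem.Dict.foldl_insert_getD_add_one_eq_counter]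
  unfold loopA
  generalize PySem.Dict.empty = sc
  induction steps generalizing sc with
  | nil => rfl
  | cons s rest ih =>
    have hs := h s (by simp)
    obtain ⟨ty, hty⟩ := Option.isSome_iff_exists.mp hs
    simp only [List.foldl_cons, List.map_cons, hty, Option.getD_some]
    rw [stepA_eq_counter_step]
    exact ih (fun x hx => h x (by simp [hx])) _

-- B's loop builds Counter(types): first-occurrence key order, full-list counts.
lemma loopB_items (types : List String) :
    ∀ (ts : List String) (seen : PySem.Set String),
    (ts.foldl (fun sc ty =>
        if sc.contains ty then sc else sc.insert ty (types.count ty : Int))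
        (PySem.Dict.mk (seen.map (fun k => (k, (types.count k : Int))))))
      = PySem.Dict.mk ((PySem.Set.update seen ts).map (fun k => (k, (types.count k : Int)))) := by
  intro ts
  induction ts with
  | nil => intro seen; rfl
  | cons t rest ih =>
    intro seen
    simp only [List.foldl_cons, PySem.Set.update_cons]
    by_cases h : t ∈ seen
    · have hc : (PySem.Dict.mk (seen.map (fun k => (k, (types.count k : Int))))).contains t = true := by
        simp [PySem.Dict.contains_eq_decide_mem_keys, PySem.Dict.keys_mk]; exact h
      rw [hc, if_pos rfl, PySem.Set.add_of_mem h]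
      exact ih seen
    · have hc : (PySem.Dict.mk (seen.map (fun k => (k, (types.count k : Int))))).contains t = false := by
        simp [PySem.Dict.contains_eq_decide_mem_keys, PySem.Dict.keys_mk]; exact h
      rw [hc]
      simp only [Bool.false_eq_true, if_false]
      have hins : (PySem.Dict.mk (seen.map (fun k => (k, (types.count k : Int))))).insert t (types.count t : Int)
          = PySem.Dict.mk ((seen ++ [t]).map (fun k => (k, (types.count k : Int)))) := by
        apply PySem.Dict.ext
        rw [PySem.Dict.items_insert_of_not_contains _ _ hc]
        simp
      rw [hins, PySem.Set.add_of_not_mem h]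
      exact ih (seen ++ [t])

-- summing the full-list counts over the distinct elements gives the length
lemma sum_counts (xs : List String) :
    ((PySem.Set.ofList xs).map (fun k => (xs.count k : Int))).sum = (xs.length : Int) := by
  have hperm : (PySem.Set.ofList xs).Perm xs.dedup := by
    rw [List.perm_ext_iff_of_nodup (PySem.Set.nodup_ofList xs) xs.nodup_dedup]
    intro a; rw [PySem.Set.mem_ofList, List.mem_dedup]
  rw [(hperm.map (fun k => (xs.count k : Int))).sum_eq]
  have : (xs.dedup.map (fun k => (xs.count k : Int))) = (xs.dedup.map (fun k => xs.count k)).map (fun n : Nat => (n : Int)) := by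
    rw [List.map_map]; rfl
  rw [this, ← Nat.cast_list_sum, List.sum_map_count_dedup_eq_length]

-- the two tails agree on a dict whose values sum to the stated total
lemma finish_eq (d : PySem.Dict String Int) (n : Int) (hsum : d.values.sum = n) :
    finishA d = finishB d n := by
  unfold finishA finishB
  dsimp only
  have hval : ∀ (d' : PySem.Dict String Int) (k : String), d'.contains k = false →
      (d'.insert k 0).values.sum = d'.values.sum := by
    intro d' k hk
    simp only [PySem.Dict.values]
    rw [PySem.Dict.items_insert_of_not_contains _ _ hk]
    simp
  by_cases h1 : d.contains "PREPARATION" = true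
  · rw [PySem.Dict.setdefault_of_contains _ _ h1]
    simp only [h1, if_true]
    by_cases h2 : d.contains "PROCESSING" = true
    · rw [PySem.Dict.setdefault_of_contains _ _ h2]
      simp only [h2, if_true, hsum]
    · rw [Bool.not_eq_true] at h2
      rw [PySem.Dict.setdefault_of_not_contains _ _ h2]
      simp only [h2, Bool.false_eq_true, if_false]
      rw [hval d _ h2, hsum]
  · rw [Bool.not_eq_true] at h1
    rw [PySem.Dict.setdefault_of_not_contains _ _ h1]
    simp only [h1, Bool.false_eq_true, if_false]
    by_cases h2 : (d.insert "PREPARATION" 0).contains "PROCESSING" = true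
    · rw [PySem.Dict.setdefault_of_contains _ _ h2]
      simp only [h2, if_true]
      rw [hval d _ h1, hsum]
    · rw [Bool.not_eq_true] at h2
      rw [PySem.Dict.setdefault_of_not_contains _ _ h2]
      simp only [h2, Bool.false_eq_true, if_false]
      rw [hval _ _ h2, hval d _ h1, hsum]

-- ===== VERDICT (by name: the statement is the Claim_ definition above) =====
theorem get_step_cnts_spec : Claim_equal_get_step_cnts := by
  intro l _ hpre
  obtain ⟨h1, h2⟩ := hpre
  obtain ⟨steps, hsteps⟩ := Option.isSome_iff_exists.mp h1
  rw [hsteps] at h2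
  simp only [Option.getD_some] at h2
  unfold Spec_get_step_cnts get_step_cnts get_step_cnts_alt
  rw [hsteps]
  simp only
  set types : List String := steps.map (fun s => (PySem.Dict.get? (PySem.Dict.mk s) "type").getD "") with htypes
  have hAdict : (if steps ≠ [] then loopA steps else PySem.Dict.empty) = loopB types := by
    have hB : loopB types = PySem.Dict.mk ((PySem.Set.ofList types).map (fun k => (k, (types.count k : Int)))) := by
      have := loopB_items types types []
      simpa [loopB, PySem.Set.update_nil_left] using this
    by_cases hne : steps = []
    · subst hne
      simp only [htypes, List.map_nil] at hB ⊢
      simp [loopB]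
    · rw [if_pos hne, loopA_eq_counter steps h2, hB, ← htypes]
      apply PySem.Dict.ext
      rw [PySem.Dict.items_counter]
  rw [hAdict]
  apply finish_eq
  have hB : loopB types = PySem.Dict.mk ((PySem.Set.ofList types).map (fun k => (k, (types.count k : Int)))) := by
    have := loopB_items types types []
    simpa [loopB, PySem.Set.update_nil_left] using this
  rw [hB]
  simp only [PySem.Dict.values, List.map_map]
  have : ((PySem.Set.ofList types).map ((fun p : String × Int => p.2) ∘ (fun k => (k, (types.count k : Int))))).sum
      = ((PySem.Set.ofList types).map (fun k => (types.count k : Int))).sum := rfl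
  rw [this, sum_counts]
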